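-- pv_equiv track=rewrite | github.com/EeyoreLee/introduction-to-algorithms | algo/max_subarray.py | get_max_lst_r
-- ===== SOURCE A (Python) =====
-- def get_max_lst_r(lst):
--     res = []
--     s = 0
--     s_tmp = 0
--     for i in range(len(lst)):
--         s_tmp += lst[i]
--         if s_tmp >= s:
--             res = lst[:i+1]
--             s = s_tmp
--     # if not isinstance(res, list):
--     #     res = []
--     return res
-- ===== SOURCE B (Python) =====
-- def get_max_lst_r(lst):
--     # Right-to-left scan: (s, k) = sum and length of the best (>=0, latest-tie)
--     # prefix of the suffix processed so far; one slice at the end.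
--     s = 0
--     k = 0
--     for x in reversed(lst):
--         t = x + s
--         if t >= 0:
--             s, k = t, k + 1
--         else:
--             s, k = 0, 0
--     return lst[:k]
-- ===== Notes on version B (the rewrite author's own statement) =====
-- stated objective: alternative
-- what changed: A scans left-to-right accumulating a prefix sum and re-slices lst[:i+1] on every improvement; B scans right-to-left keeping only (sum, length) of the best nonnegative latest-tie prefix of the suffix seen so far, and slices once at the end.
import Mathlib
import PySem

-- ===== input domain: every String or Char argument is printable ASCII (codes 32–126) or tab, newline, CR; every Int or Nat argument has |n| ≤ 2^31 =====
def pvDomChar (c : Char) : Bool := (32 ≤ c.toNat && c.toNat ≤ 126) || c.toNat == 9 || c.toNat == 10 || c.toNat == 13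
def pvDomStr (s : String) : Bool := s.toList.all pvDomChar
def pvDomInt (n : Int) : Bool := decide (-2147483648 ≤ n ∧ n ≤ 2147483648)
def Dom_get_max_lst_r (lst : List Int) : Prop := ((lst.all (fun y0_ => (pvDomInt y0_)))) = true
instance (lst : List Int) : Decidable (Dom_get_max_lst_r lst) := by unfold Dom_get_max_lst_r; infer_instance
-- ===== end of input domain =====

-- B scans right-to-left, keeping only (sum, length) of the best prefix of the suffix seen so far,
-- and slices once at the end; A re-slices lst[:i+1] on every improvement of the running prefix sum.

-- ===== PORT A =====
-- state (res, s, s_tmp); lst[i] for i in range(len(lst)) is always in range, so pyGetD's default 0 is never used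
def get_max_lst_r (lst : List Int) : List Int :=
  ((PySem.List.pyRange 0 lst.length 1).foldl
    (fun (st : List Int × Int × Int) (i : Int) =>
      let s_tmp := st.2.2 + PySem.List.pyGetD lst i 0
      if s_tmp ≥ st.2.1 then (PySem.List.slice lst none (some (i + 1)), s_tmp, s_tmp)
      else (st.1, st.2.1, s_tmp))
    ([], 0, 0)).1

-- ===== PORT B =====
-- loop body of Source B: one step of the right-to-left scan, state (s, k)
def bstep (x : Int) (st : Int × Int) : Int × Int :=
  let t := x + st.1
  if t ≥ 0 then (t, st.2 + 1) else (0, 0)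

-- 'for x in reversed(lst)' threading (s, k) is exactly a right fold with bstep
def get_max_lst_r_alt (lst : List Int) : List Int :=
  PySem.List.slice lst none (some ((lst.foldr bstep (0, 0)).2))

-- ===== PRECONDITION & SPEC =====
def Spec_get_max_lst_r (lst : List Int) (out : List Int) : Prop := out = get_max_lst_r_alt lst
instance (lst : List Int) (out : List Int) : Decidable (Spec_get_max_lst_r lst out) := by unfold Spec_get_max_lst_r; infer_instance

-- ===== CLAIM (what is proved, stated in full; the proofs are below) =====
def Claim_equal_get_max_lst_r : Prop := ∀ (lst : List Int), Dom_get_max_lst_r lst → Spec_get_max_lst_r lst (get_max_lst_r lst)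

-- ===== LEMMAS AND PROOFS =====

-- A's index loop over range(len(lst)) with lst[i] lookups equals a fold over enumerate
theorem fold_pyRange_enumerate {σ : Type} (g : σ → Int → Int → σ) :
    ∀ (xs full : List Int) (k : Nat), full.drop k = xs → ∀ (init : σ),
    (PySem.List.pyRange k full.length 1).foldl
        (fun st i => g st i (PySem.List.pyGetD full i 0)) init
    = (PySem.List.enumerate xs k).foldl (fun st p => g st p.1 p.2) init := by
  intro xs
  induction xs with
  | nil =>
    intro full k h init
    have hlen : full.length ≤ k := by
      by_contra hc
      have := List.drop_eq_nil_iff.mp h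
      omega
    rw [PySem.List.pyRange_one_eq_nil (by exact_mod_cast hlen)]
    simp [PySem.List.enumerate_nil]
  | cons x xs ih =>
    intro full k h init
    have hk : k < full.length := by
      by_contra hc
      rw [List.drop_eq_nil_of_le (by omega)] at h
      exact List.cons_ne_nil x xs h.symm
    have hx : full[k]? = some x := by
      have h0 : (full.drop k)[0]? = full[k + 0]? := List.getElem?_drop ..
      simp [h] at h0
      simpa using h0.symm
    have hget : PySem.List.pyGetD full (k : Int) 0 = x := by
      rw [PySem.List.pyGetD_natCast]
      simp [List.getD_eq_getElem?_getD, hx]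
    rw [PySem.List.pyRange_one_cons (by exact_mod_cast hk)]
    rw [List.foldl_cons, hget]
    have hdrop : full.drop (k + 1) = xs := by
      rw [← List.drop_drop, h]
      simp
    have := ih full (k + 1) hdrop (g init (k : Int) x)
    rw [PySem.List.enumerate_cons, List.foldl_cons]
    simpa [Nat.cast_add] using this

-- A's fold with slices runs in lock-step with a purely numeric fold tracking (best_s, best_i, s)
theorem lockstep (full : List Int) :
    ∀ (xs : List Int) (j : Int) (s st bi : Int),
    (((PySem.List.enumerate xs j).foldl
        (fun (st : List Int × Int × Int) (p : Int × Int) =>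
          let s_tmp := st.2.2 + p.2
          if s_tmp ≥ st.2.1 then (PySem.List.slice full none (some (p.1 + 1)), s_tmp, s_tmp)
          else (st.1, st.2.1, s_tmp))
        (PySem.List.slice full none (some (bi + 1)), s, st)).1)
    = PySem.List.slice full none (some
        (((PySem.List.enumerate xs j).foldl
            (fun (st : Int × Int × Int) (p : Int × Int) =>
              let s := st.2.2 + p.2
              if s ≥ st.1 then (s, p.1, s) else (st.1, st.2.1, s))
            (s, bi, st)).2.1 + 1)) := by
  intro xs
  induction xs with
  | nil => intro j s st bi; simp [PySem.List.enumerate_nil]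
  | cons x xs ih =>
    intro j s st bi
    rw [PySem.List.enumerate_cons, List.foldl_cons, List.foldl_cons]
    by_cases hc : st + x ≥ s
    · simpa [hc] using ih (j + 1) (st + x) (st + x) j
    · simpa [hc] using ih (j + 1) s (st + x) bi

-- invariants of B's right fold: the kept sum and length are nonnegative, and length 0 forces sum 0
theorem bfold_inv (xs : List Int) :
    0 ≤ (xs.foldr bstep (0, 0)).1 ∧ 0 ≤ (xs.foldr bstep (0, 0)).2 ∧
      ((xs.foldr bstep (0, 0)).2 = 0 → (xs.foldr bstep (0, 0)).1 = 0) := by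
  induction xs with
  | nil => simp
  | cons x xs ih =>
    obtain ⟨h1, h2, h3⟩ := ih
    simp only [List.foldr_cons, bstep]
    split_ifs with hc
    · exact ⟨hc, by omega, by omega⟩
    · simp

-- the numeric left fold's final best index, expressed through B's right fold
theorem leftfold_eq_bfold :
    ∀ (xs : List Int) (j b bi s : Int), s ≤ b → 0 ≤ b →
    ((PySem.List.enumerate xs j).foldl
        (fun (st : Int × Int × Int) (p : Int × Int) =>
          let s := st.2.2 + p.2
          if s ≥ st.1 then (s, p.1, s) else (st.1, st.2.1, s))
        (b, bi, s)).2.1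
    = (if 0 < (xs.foldr bstep (0, 0)).2 ∧ b ≤ s + (xs.foldr bstep (0, 0)).1
        then j + (xs.foldr bstep (0, 0)).2 - 1 else bi) := by
  intro xs
  induction xs with
  | nil => intro j b bi s hs hb; simp [PySem.List.enumerate_nil]
  | cons x xs ih =>
    intro j b bi s hs hb
    obtain ⟨hg1, hg2, hg3⟩ := bfold_inv xs
    rw [PySem.List.enumerate_cons, List.foldl_cons]
    simp only [List.foldr_cons, bstep, ge_iff_le]
    by_cases hc : b ≤ s + x
    · rw [if_pos hc, ih (j + 1) (s + x) j (s + x) le_rfl (by omega)]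
      have ht : 0 ≤ x + (xs.foldr bstep (0, 0)).1 := by omega
      rw [if_pos ht]
      by_cases hk : 0 < (xs.foldr bstep (0, 0)).2
      · rw [if_pos ⟨hk, by omega⟩]
        simp only []
        rw [if_pos ⟨by omega, by omega⟩]
        omega
      · rw [if_neg (by omega)]
        have := hg3 (by omega)
        simp only []
        rw [if_pos ⟨by omega, by omega⟩]
        omega
    · rw [if_neg hc, ih (j + 1) b bi (s + x) (by omega) hb]
      by_cases ht : 0 ≤ x + (xs.foldr bstep (0, 0)).1
      · rw [if_pos ht]
        simp only []
        by_cases hcond : b ≤ s + (x + (xs.foldr bstep (0, 0)).1)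
        · have hk : 0 < (xs.foldr bstep (0, 0)).2 := by
            by_contra hk0
            have := hg3 (by omega)
            omega
          rw [if_pos ⟨hk, by omega⟩, if_pos ⟨by omega, by omega⟩]
          omega
        · rw [if_neg (by omega), if_neg (by omega)]
      · rw [if_neg ht]
        rw [if_neg (by rintro ⟨-, h⟩; omega)]
        rw [if_neg (by rintro ⟨h0, -⟩; simp at h0)]

-- ===== VERDICT (by name: the statement is the Claim_ definition above) =====
theorem get_max_lst_r_spec : Claim_equal_get_max_lst_r := by
  intro lst _
  unfold Spec_get_max_lst_r get_max_lst_r get_max_lst_r_alt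
  have h1 := fold_pyRange_enumerate
    (g := fun (st : List Int × Int × Int) (i : Int) (x : Int) =>
      let s_tmp := st.2.2 + x
      if s_tmp ≥ st.2.1 then (PySem.List.slice lst none (some (i + 1)), s_tmp, s_tmp)
      else (st.1, st.2.1, s_tmp))
    lst lst 0 (by simp) ([], 0, 0)
  have h0 : (PySem.List.slice lst none (some ((-1 : Int) + 1))) = ([] : List Int) := by
    norm_num
    simpa using PySem.List.slice_to (xs := lst) (b := 0) (by norm_num)
  have h2 := lockstep lst lst 0 0 0 (-1)
  rw [h0] at h2
  simp only [Nat.cast_zero] at h1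
  rw [h1, h2]
  obtain ⟨hg1, hg2, hg3⟩ := bfold_inv lst
  rw [leftfold_eq_bfold lst 0 0 (-1) 0 le_rfl le_rfl]
  by_cases hk : 0 < (lst.foldr bstep (0, 0)).2
  · rw [if_pos ⟨hk, by omega⟩]
    norm_num
  · rw [if_neg (by omega)]
    have h4 : (lst.foldr bstep (0, 0)).2 = 0 := by omega
    rw [h4]
    norm_num
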